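-- pv_equiv track=rewrite | github.com/mtitze/accphys | accphys/adbooster.py | _spaces_per_level
-- ===== SOURCE A (Python) =====
-- def _spaces_per_level(npat):
--     levels = sorted(npat.keys())
--     _pat_pos = lambda key: list(npat[key].items())[0] # for a given level (key), obtain the pattern and the position(s)
--     spaces_in_level = []
--     for level in levels:
--         pattern, pos = _pat_pos(level)
--         n_pos = len(pos) # number of occurences of pattern in next level
--         space = len(pattern)*n_pos # space pattern copies occupy in next level
--         for e in spaces_in_level:
--             if len(e) > 0:
--                 sp, po = e[-1]
--                 e.append((sp*n_pos, po*n_pos))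
--         spaces_in_level.append([(space, n_pos)])
--     # the k-th entry ek of 'spaces_in_level' is a list of integers. It is related to level[k].
--     # ek[j] consists of two numbers:
--     # 1) The space occupied of level[k] in level[k + j + 1].
--     # 2) The total number of occurences of level[k] in level[k + j + 1]
--     return spaces_in_level
-- ===== SOURCE B (Python) =====
-- def _spaces_per_level(npat):
--     # Pass 1: per level (in sorted order) record (space, n_pos).
--     info = []
--     for level in sorted(npat):
--         pattern, pos = next(iter(npat[level].items()))
--         info.append((len(pattern) * len(pos), len(pos)))
--     # Pass 2: each output row k is the suffix cumulative product starting at info[k].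
--     out = []
--     for k in range(len(info)):
--         sp, po = info[k]
--         row = [(sp, po)]
--         for _, n in info[k + 1:]:
--             sp, po = sp * n, po * n
--             row.append((sp, po))
--         out.append(row)
--     return out
-- ===== Notes on version B (the rewrite author's own statement) =====
-- stated objective: alternative
-- what changed: A builds rows column-wise, appending a new entry to every earlier row at each level; B first collects (space, n_pos) per level and then builds each row independently as a suffix cumulative product over the later levels' n_pos values.
import Mathlib
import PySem

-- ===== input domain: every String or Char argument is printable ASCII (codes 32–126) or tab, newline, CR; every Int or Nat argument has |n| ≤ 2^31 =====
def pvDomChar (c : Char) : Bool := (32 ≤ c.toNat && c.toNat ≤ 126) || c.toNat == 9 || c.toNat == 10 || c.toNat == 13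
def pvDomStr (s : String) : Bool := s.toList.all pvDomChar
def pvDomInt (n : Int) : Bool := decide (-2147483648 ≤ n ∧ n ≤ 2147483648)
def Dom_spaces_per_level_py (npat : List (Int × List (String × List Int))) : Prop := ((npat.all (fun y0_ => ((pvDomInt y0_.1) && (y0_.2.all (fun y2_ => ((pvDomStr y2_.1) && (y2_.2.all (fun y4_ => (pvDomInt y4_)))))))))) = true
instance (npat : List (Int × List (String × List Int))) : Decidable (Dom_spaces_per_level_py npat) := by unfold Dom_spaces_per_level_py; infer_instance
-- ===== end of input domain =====

-- B replaces A's column-wise "append to every earlier row at each level" update by a per-level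
-- (space, n_pos) pre-pass followed by independent per-row suffix cumulative products (objective:
-- alternative decomposition, same asymptotic cost).
-- A mutates nothing observable; equivalence is about the return value.

-- ===== PORT A =====
-- the body of A's inner 'for e in spaces_in_level: if len(e) > 0: …' loop (value view of the in-place append)
def pvMulRow (n : Int) (e : List (Int × Int)) : List (Int × Int) :=
  match e.getLast? with          -- e[-1] when len(e) > 0
  | some (sp, po) => e ++ [(sp * n, po * n)]
  | none => e

def spaces_per_level_py (npat : List (Int × List (String × List Int))) : List (List (Int × Int)) :=
  let d := PySem.Dict.ofList npat
  let levels := PySem.List.sorted d.keys (fun x => x) false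
  levels.foldl (fun spaces_in_level level =>
    -- _pat_pos: list(npat[key].items())[0]; the .getD ("", []) default is never hit under Pre_
    let pp := (PySem.List.pyGet? (PySem.Dict.ofList (d.getD level [])).items 0).getD ("", [])
    let n_pos : Int := pp.2.length
    let space : Int := PySem.Str.len pp.1 * n_pos
    spaces_in_level.map (pvMulRow n_pos) ++ [[(space, n_pos)]]) []

-- ===== PORT B =====
-- inner loop of B: row = [(sp, po)]; for _, n in info[k+1:]: sp, po = sp*n, po*n; row.append(...)
def pvBRow : Int × Int → List (Int × Int) → List (Int × Int)
  | p, [] => [p]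
  | (sp, po), (_, n) :: rest => (sp, po) :: pvBRow (sp * n, po * n) rest

-- outer loop of B over k (head of the suffix = info[k], tail = info[k+1:])
def pvBRows : List (Int × Int) → List (List (Int × Int))
  | [] => []
  | p :: rest => pvBRow p rest :: pvBRows rest

def spaces_per_level_py_alt (npat : List (Int × List (String × List Int))) : List (List (Int × Int)) :=
  let d := PySem.Dict.ofList npat
  let info := (PySem.List.sorted d.keys (fun x => x) false).map (fun level =>
    -- next(iter(npat[level].items())); the .getD ("", []) default is never hit under Pre_
    let pp := ((PySem.Dict.ofList (d.getD level [])).items.head?).getD ("", [])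
    (PySem.Str.len pp.1 * (pp.2.length : Int), (pp.2.length : Int)))
  pvBRows info

-- ===== PRECONDITION & SPEC =====
-- Pre_ excludes inputs with an empty inner dict, on which Python A raises IndexError
-- (and Python B raises StopIteration): list(npat[key].items())[0] has no element 0 there.
def Pre_spaces_per_level_py (npat : List (Int × List (String × List Int))) : Prop :=
  ∀ p ∈ npat, p.2 ≠ []
instance (npat : List (Int × List (String × List Int))) : Decidable (Pre_spaces_per_level_py npat) := by unfold Pre_spaces_per_level_py; infer_instance

def pvWitness_spaces_per_level_py : (List (Int × List (String × List Int))) :=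
  [(1, [("ab", [0, 1])]), (0, [("xyz", [5])])]

def Spec_spaces_per_level_py (npat : List (Int × List (String × List Int))) (out : List (List (Int × Int))) : Prop := out = spaces_per_level_py_alt npat
instance (npat : List (Int × List (String × List Int))) (out : List (List (Int × Int))) : Decidable (Spec_spaces_per_level_py npat out) := by unfold Spec_spaces_per_level_py; infer_instance

-- ===== CLAIM (what is proved, stated in full; the proofs are below) =====
def Claim_equal_spaces_per_level_py : Prop := ∀ (npat : List (Int × List (String × List Int))), Dom_spaces_per_level_py npat → Pre_spaces_per_level_py npat → Spec_spaces_per_level_py npat (spaces_per_level_py npat)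

-- ===== LEMMAS AND PROOFS =====

-- xs[0] on a list is its head
theorem pv_pyGet?_zero {α : Type} (l : List α) : PySem.List.pyGet? l 0 = l.head? := by
  cases l <;> simp [PySem.List.pyGet?, PySem.List.pyIdx?]

-- a B-row is never empty
theorem pv_brow_ne_nil (p : Int × Int) (rest : List (Int × Int)) : pvBRow p rest ≠ [] := by
  obtain ⟨sp, po⟩ := p
  cases rest with
  | nil => simp [pvBRow]
  | cons r t => obtain ⟨rs, rn⟩ := r; simp [pvBRow]

-- appending one more level to the suffix extends a B-row exactly like A's per-step update
theorem pv_brow_append (rest : List (Int × Int)) (p q : Int × Int) :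
    pvBRow p (rest ++ [q]) = pvMulRow q.2 (pvBRow p rest) := by
  induction rest generalizing p with
  | nil =>
    obtain ⟨sp, po⟩ := p; obtain ⟨s, n⟩ := q
    simp [pvBRow, pvMulRow]
  | cons r rest ih =>
    obtain ⟨sp, po⟩ := p; obtain ⟨rs, rn⟩ := r; obtain ⟨s, n⟩ := q
    simp only [List.cons_append, pvBRow, ih]
    have hne : pvBRow (sp * rn, po * rn) rest ≠ [] := pv_brow_ne_nil _ _
    cases h : (pvBRow (sp * rn, po * rn) rest).getLast? with
    | none => exact absurd (List.getLast?_eq_none_iff.mp h) hne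
    | some v =>
      have h2 : ((sp, po) :: pvBRow (sp * rn, po * rn) rest).getLast? = some v := by
        cases hb : pvBRow (sp * rn, po * rn) rest with
        | nil => exact absurd hb hne
        | cons b t => rw [hb] at h; rw [List.getLast?_cons_cons]; exact h
      obtain ⟨v1, v2⟩ := v
      simp [pvMulRow, h, h2]

theorem pv_brows_append (xs : List (Int × Int)) (q : Int × Int) :
    pvBRows (xs ++ [q]) = (pvBRows xs).map (pvMulRow q.2) ++ [[q]] := by
  induction xs with
  | nil => simp [pvBRows, pvBRow]
  | cons x xs ih =>
    simp only [List.cons_append, pvBRows, ih, List.map_cons, pv_brow_append]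

-- A's fold over the (space, n_pos) sequence computes B's rows
theorem pv_fold_eq (pairs : List (Int × Int)) :
    pairs.foldl (fun acc p => acc.map (pvMulRow p.2) ++ [[p]]) [] = pvBRows pairs := by
  induction pairs using List.reverseRecOn with
  | nil => rfl
  | append_singleton xs q ih =>
    rw [List.foldl_append, List.foldl_cons, List.foldl_nil, ih, pv_brows_append]

-- ===== VERDICT (by name: the statement is the Claim_ definition above) =====
theorem spaces_per_level_py_spec : Claim_equal_spaces_per_level_py := by
  intro npat _ _
  unfold Spec_spaces_per_level_py spaces_per_level_py spaces_per_level_py_alt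
  rw [← pv_fold_eq, List.foldl_map]
  simp only [pv_pyGet?_zero]
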